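-- pv_equiv track=rewrite | github.com/nath54/SemanticSearch-ALE | PythonScripts/ner_algorithms.py | recognize
-- ===== SOURCE A (Python) =====
-- from typing import Optional, Any, cast
--
-- def recognize(txt: str) -> list[ tuple[int, str, str] ]:
--     """
--     Reconnaissance d'entité nommée par des règles syntaxiques de bases:
--         - Un mot qui commence par une majuscule et qui n'est pas le premier mot d'une phrase a de fortes chances d'être une entité nommée
--         - Un mot qui est tout en majuscule a de fortes chance d'être une entité nommée
--
--     Args:
--         txt (str): Le texte dont on veut extraire les entités nommés.
--
--     Returns:
--         list[ tuple[int, str, str] ]: La liste des entités nommés reconnues, sous le format (position dans la chaîne `txt`, texte de l'entité, type de l'entité).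
--     """
--
--     # Variables utiles
--     current_sentence: int = 0
--     sentences: list[list[int]] = [[]]
--     words: list[str] = []
--     words_positions: list[int] = []
--     are_words_entities: list[Optional[str]] = []
--
--     SEP_SENTENCES: set[str] = {'?', '.', '!', '\n', '\r'}
--     SEP_WORDS: set[str] = {' ', '?', '!', '.', '\n', '\r', "'", '"', '(', ')', '[', ']', '/', '\\', ':', ',', ';', '>', '<', '{', '}'}
--     CHARS_IN_NER: set[str] = {'@', '#', '&', '_', 'A', 'B', 'C', 'D', 'E', 'F', 'G', 'H', 'I', 'J', 'K', 'L', 'M', 'N', 'O', 'P', 'Q', 'R', 'S', 'T', 'U', 'V', 'W', 'X', 'Y', 'Z'}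
--
--     txt_len: int = len(txt)
--     txt_cursor: int = 0
--     # On s'assure de parcourir tout le texte
--     while txt_cursor < txt_len:
--
--         # Tant que l'on a des caractères séparateurs, on skippe
--         while txt_cursor < txt_len and txt[txt_cursor] in SEP_WORDS:
--             #
--             if txt[txt_cursor] in SEP_SENTENCES:
--                 if len(sentences[current_sentence]) > 0:
--                     sentences.append([])
--                     current_sentence += 1
--             #
--             txt_cursor += 1
--
--         # On a atteint la fin du texte
--         if txt_cursor >= txt_len:
--             break
--
--         # On va lire tout le mot
--         deb_cursor: int = txt_cursor
--         while txt_cursor < txt_len and txt[txt_cursor] not in SEP_WORDS: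
--             txt_cursor += 1
--
--         # On récupère le mot
--         word: str = txt[deb_cursor: txt_cursor]
--
--         # Ce ne devrais normalement pas arriver, mais au cas où, si le mot est vide, on passe au mot suivant
--         if len(word) == 0:
--             continue
--
--         # On va tester si ce mot est une entité nommée ou nom avec des tests syntaxiques basiques
--         is_entity: Optional[str] = None
--
--         # Si le mot contient
--         if not len(sentences[current_sentence]) == 0 and word[0].isupper():
--             is_entity = ""
--         elif len(word) > 1 and any([c in word[1:] for c in CHARS_IN_NER]):
--             is_entity = ""
--         elif len(word) > 1 and word.isupper():
--             is_entity = ""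
--
--         # On ajoute ce mot aux mots trouvés
--         sentences[current_sentence].append(len(words))
--         words.append(word)
--         words_positions.append(deb_cursor)
--         are_words_entities.append(is_entity)
--
--     # Liste des résultats que l'on va renvoyer
--     resultats: list[ tuple[int, str, str] ] = []
--
--     for idw in range(len(words)):
--         if are_words_entities[idw] is not None:
--             resultats.append( (words_positions[idw], words[idw], are_words_entities[idw]) )
--
--     # On renvoie les résultats
--     return resultats
-- ===== SOURCE B (Python) =====
-- def recognize(txt: str) -> list[tuple[int, str, str]]:
--     """Single-pass character automaton: no parallel word lists, no second filter pass."""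
--
--     SEP_SENTENCES: set[str] = {'?', '.', '!', '\n', '\r'}
--     SEP_WORDS: set[str] = {' ', '?', '!', '.', '\n', '\r', "'", '"', '(', ')', '[', ']', '/', '\\', ':', ',', ';', '>', '<', '{', '}'}
--     CHARS_IN_NER: set[str] = {'@', '#', '&', '_', 'A', 'B', 'C', 'D', 'E', 'F', 'G', 'H', 'I', 'J', 'K', 'L', 'M', 'N', 'O', 'P', 'Q', 'R', 'S', 'T', 'U', 'V', 'W', 'X', 'Y', 'Z'}
--
--     def is_entity(w: str, sentence_has_word: bool) -> bool:
--         return (sentence_has_word and w[0].isupper()) \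
--             or (len(w) > 1 and any(ch in CHARS_IN_NER for ch in w[1:])) \
--             or (len(w) > 1 and w.isupper())
--
--     results: list[tuple[int, str, str]] = []
--     sentence_has_word: bool = False
--     word: str = ''
--     word_start: int = 0
--
--     for i, c in enumerate(txt):
--         if c in SEP_WORDS:
--             if word:
--                 if is_entity(word, sentence_has_word):
--                     results.append((word_start, word, ''))
--                 sentence_has_word = True
--                 word = ''
--             if c in SEP_SENTENCES and sentence_has_word:
--                 sentence_has_word = False
--         else:
--             if not word:
--                 word_start = i
--             word += c
--
--     if word and is_entity(word, sentence_has_word):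
--         results.append((word_start, word, ''))
--
--     return results
-- ===== Notes on version B (the rewrite author's own statement) =====
-- stated objective: simpler
-- what changed: A's three-pass design (separator-skip/word-read nested while loops building four parallel lists plus a second index loop filtering them) is replaced by a single for-loop character automaton that keeps one boolean sentence-has-word flag and the pending word, and appends qualifying entities directly to the result list.
import Mathlib
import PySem

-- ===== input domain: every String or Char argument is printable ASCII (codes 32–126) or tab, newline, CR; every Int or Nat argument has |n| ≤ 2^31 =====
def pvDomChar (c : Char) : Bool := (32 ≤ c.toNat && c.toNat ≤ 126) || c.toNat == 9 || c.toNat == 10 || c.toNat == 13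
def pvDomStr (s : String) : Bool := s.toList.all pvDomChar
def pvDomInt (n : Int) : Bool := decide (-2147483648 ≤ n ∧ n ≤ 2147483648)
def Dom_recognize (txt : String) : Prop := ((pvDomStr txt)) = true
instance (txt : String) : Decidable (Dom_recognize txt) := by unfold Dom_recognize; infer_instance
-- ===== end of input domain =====

-- B replaces A's three-pass, four-parallel-list design by a single-pass character automaton
-- carrying one boolean flag and emitting results directly (objective: simpler).

-- Shared constants (Python set literals of distinct single characters, used only for membership)
def sepSentences : List Char := ['?', '.', '!', '\n', '\r']
def sepWords : List Char :=
  [' ', '?', '!', '.', '\n', '\r', '\'', '"', '(', ')', '[', ']', '/', '\\', ':', ',', ';', '>', '<', '{', '}']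
def charsInNer : List Char :=
  ['@', '#', '&', '_', 'A', 'B', 'C', 'D', 'E', 'F', 'G', 'H', 'I', 'J', 'K', 'L', 'M',
   'N', 'O', 'P', 'Q', 'R', 'S', 'T', 'U', 'V', 'W', 'X', 'Y', 'Z']

-- Python str.isupper(): at least one cased char and no lowercase cased char (exact on the ASCII domain,
-- where the cased characters are exactly the letters)
def pyStrIsUpper (w : List Char) : Bool :=
  w.any PySem.Chars.isupper && w.all (fun c => !PySem.Chars.islower c)

-- ===== PORT A =====
-- inner `while txt_cursor < txt_len and txt[txt_cursor] in SEP_WORDS` skip loop, updating (sentences, current_sentence)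
def skipSepsA : List Char → Int → List (List Int) → Int → List Char × Int × List (List Int) × Int
  | [], pos, ss, cur => ([], pos, ss, cur)
  | c :: rest, pos, ss, cur =>
    if sepWords.contains c then
      if sepSentences.contains c then
        if (PySem.List.pyGetD ss cur []).length > 0 then
          skipSepsA rest (pos + 1) (ss ++ [[]]) (cur + 1)
        else skipSepsA rest (pos + 1) ss cur
      else skipSepsA rest (pos + 1) ss cur
    else (c :: rest, pos, ss, cur)

-- inner `while txt_cursor < txt_len and txt[txt_cursor] not in SEP_WORDS` word-reading loop;
-- returns (rest of text, cursor, the word chars txt[deb_cursor:txt_cursor])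
def readWordA : List Char → Int → List Char × Int × List Char
  | [], pos => ([], pos, [])
  | c :: rest, pos =>
    if sepWords.contains c then (c :: rest, pos, [])
    else
      let r := readWordA rest (pos + 1)
      (r.1, r.2.1, c :: r.2.2)

-- the `is_entity` elif chain of A
def entityA (ss : List (List Int)) (cur : Int) (w : List Char) : Option String :=
  if !((PySem.List.pyGetD ss cur []).length == 0) && PySem.Chars.isupper (PySem.List.pyGetD w 0 ' ') then
    some ""
  else if decide (w.length > 1) && charsInNer.any (fun c => (w.drop 1).contains c) then
    some ""
  else if decide (w.length > 1) && pyStrIsUpper w then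
    some ""
  else none

-- A's outer `while txt_cursor < txt_len` loop; accumulates (words, words_positions, are_words_entities).
-- The fuel is the number of unread characters: every iteration that does not break reads a word of at
-- least one character, so `fuel = cs.length` never runs out (proved in loopA_fuel below).
-- A's `if len(word) == 0: continue` is unreachable: the word starts with the non-separator character c.
def loopA : Nat → List Char → Int → List (List Int) → Int →
    List String → List Int → List (Option String) →
    List String × List Int × List (Option String)
  | 0, _, _, _, _, words, wpos, ents => (words, wpos, ents)
  | fuel + 1, cs, pos, ss, cur, words, wpos, ents =>
    match skipSepsA cs pos ss cur with
    | (rem, pos1, ss1, cur1) =>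
      match rem with
      | [] => (words, wpos, ents)
      | c :: rest =>
        let r := readWordA rest (pos1 + 1)
        let w : List Char := c :: r.2.2
        let e := entityA ss1 cur1 w
        let ss2 := PySem.List.pySetD ss1 cur1 ((PySem.List.pyGetD ss1 cur1 []) ++ [PySem.List.len words])
        loopA fuel r.1 r.2.1 ss2 cur1 (words ++ [String.mk w]) (wpos ++ [pos1]) (ents ++ [e])

-- A's final `for idw in range(len(words))` filter pass
def passA (words : List String) (wpos : List Int) (ents : List (Option String)) :
    List (Int × String × String) :=
  (PySem.List.pyRange 0 (PySem.List.len words)).foldl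
    (fun acc idw =>
      match PySem.List.pyGetD ents idw none with
      | some e => acc ++ [(PySem.List.pyGetD wpos idw 0, PySem.List.pyGetD words idw "", e)]
      | none => acc) []

def recognize (txt : String) : List (Int × String × String) :=
  let r := loopA txt.toList.length txt.toList 0 [[]] 0 [] [] []
  passA r.1 r.2.1 r.2.2

-- ===== PORT B =====
-- the `is_entity` disjunction of B
def entityB (flag : Bool) (w : List Char) : Bool :=
  (flag && PySem.Chars.isupper (PySem.List.pyGetD w 0 ' ')) ||
  (decide (w.length > 1) && (w.drop 1).any (fun ch => charsInNer.contains ch)) ||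
  (decide (w.length > 1) && pyStrIsUpper w)

-- B's single `for i, c in enumerate(txt)` loop: state = (flag, current word, its start, results)
def loopB : List Char → Int → Bool → List Char → Int → List (Int × String × String) →
    List (Int × String × String)
  | [], _, flag, word, wstart, acc =>
    if !word.isEmpty && entityB flag word then acc ++ [(wstart, String.mk word, "")] else acc
  | c :: rest, i, flag, word, wstart, acc =>
    if sepWords.contains c then
      let p : Bool × List (Int × String × String) :=
        if !word.isEmpty then
          (true, if entityB flag word then acc ++ [(wstart, String.mk word, "")] else acc)
        else (flag, acc)
      let flag2 := if sepSentences.contains c && p.1 then false else p.1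
      loopB rest (i + 1) flag2 [] wstart p.2
    else
      if word.isEmpty then loopB rest (i + 1) flag [c] i acc
      else loopB rest (i + 1) flag (word ++ [c]) wstart acc

def recognize_alt (txt : String) : List (Int × String × String) :=
  loopB txt.toList 0 false [] 0 []

-- ===== PRECONDITION & SPEC =====
def Spec_recognize (txt : String) (out : List (Int × String × String)) : Prop := out = recognize_alt txt
instance (txt : String) (out : List (Int × String × String)) : Decidable (Spec_recognize txt out) := by unfold Spec_recognize; infer_instance

-- ===== CLAIM (what is proved, stated in full; the proofs are below) =====
def Claim_equal_recognize : Prop := ∀ (txt : String), Dom_recognize txt → Spec_recognize txt (recognize txt)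

-- ===== LEMMAS AND PROOFS =====

theorem skipSepsA_fst_len (cs : List Char) : ∀ (pos : Int) (ss : List (List Int)) (cur : Int),
    (skipSepsA cs pos ss cur).1.length ≤ cs.length := by
  induction cs with
  | nil => intro pos ss cur; simp [skipSepsA]
  | cons c rest ih =>
    intro pos ss cur
    simp only [skipSepsA]
    split_ifs <;> simp <;> exact le_trans (ih _ _ _) (Nat.le_succ _)

theorem readWordA_fst_len (cs : List Char) : ∀ (pos : Int),
    (readWordA cs pos).1.length ≤ cs.length := by
  induction cs with
  | nil => intro pos; simp [readWordA]
  | cons c rest ih =>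
    intro pos
    simp only [readWordA]
    split_ifs with h
    · simp
    · exact le_trans (ih _) (Nat.le_succ _)

theorem getD_append_length (ss : List (List Int)) (l : List Int) :
    PySem.List.pyGetD (ss ++ [l]) (ss.length : Int) [] = l := by
  rw [PySem.List.pyGetD_natCast]
  simp [List.getD]

theorem setD_append_length (ss : List (List Int)) (l v : List Int) :
    PySem.List.pySetD (ss ++ [l]) (ss.length : Int) v = ss ++ [v] := by
  rw [PySem.List.pySetD_natCast]
  simp

theorem any_contains_comm (l m : List Char) :
    (l.any fun c => m.contains c) = (m.any fun c => l.contains c) := by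
  apply Bool.eq_iff_iff.mpr
  simp only [List.any_eq_true, List.contains_iff_mem]
  constructor <;> rintro ⟨x, hx, hy⟩ <;> exact ⟨x, hy, hx⟩

theorem entityA_eq_entityB (ss : List (List Int)) (last : List Int) (w : List Char) :
    entityA (ss ++ [last]) (ss.length : Int) w =
      if entityB (!last.isEmpty) w then some "" else none := by
  unfold entityA entityB
  rw [getD_append_length, any_contains_comm]
  rcases hl : last with _ | _ <;>
    rcases h1 : PySem.Chars.isupper (PySem.List.pyGetD w 0 ' ') <;>
    rcases h2 : (charsInNer.any fun c => (w.drop 1).contains c) <;>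
    rcases h3 : pyStrIsUpper w <;>
    by_cases h4 : w.length > 1 <;>
    simp [h4]

theorem passA_append (ws : List String) (ps : List Int) (es : List (Option String))
    (w : String) (p : Int) (e : Option String)
    (h1 : ps.length = ws.length) (h2 : es.length = ws.length) :
    passA (ws ++ [w]) (ps ++ [p]) (es ++ [e]) =
      passA ws ps es ++ (match e with | some s => [(p, w, s)] | none => []) := by
  unfold passA
  have hlen : PySem.List.len (ws ++ [w]) = PySem.List.len ws + 1 := by
    simp [PySem.List.len_eq]
  rw [hlen, PySem.List.pyRange_one_succ_right (by simp [PySem.List.len_eq])]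
  rw [List.foldl_append]
  have hcong : ∀ (acc : List (Int × String × String)), ∀ i ∈ PySem.List.pyRange 0 (PySem.List.len ws),
      (fun acc idw =>
        match PySem.List.pyGetD (es ++ [e]) idw none with
        | some s => acc ++ [(PySem.List.pyGetD (ps ++ [p]) idw 0, PySem.List.pyGetD (ws ++ [w]) idw "", s)]
        | none => acc) acc i =
      (fun acc idw =>
        match PySem.List.pyGetD es idw none with
        | some s => acc ++ [(PySem.List.pyGetD ps idw 0, PySem.List.pyGetD ws idw "", s)]
        | none => acc) acc i := by
    intro acc i hi
    rw [PySem.List.mem_pyRange_one] at hi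
    obtain ⟨hi0, hi1⟩ := hi
    rw [PySem.List.len_eq] at hi1
    obtain ⟨k, rfl⟩ : ∃ k : Nat, i = (k : Int) := ⟨i.toNat, (Int.toNat_of_nonneg hi0).symm⟩
    have hk : k < ws.length := by exact_mod_cast hi1
    simp only [PySem.List.pyGetD_natCast]
    rw [List.getD_append _ _ _ _ (by omega), List.getD_append _ _ _ _ (by omega),
        List.getD_append _ _ _ _ (by omega)]
  rw [PySem.List.foldl_congr_mem _ _ _ _ hcong]
  have hn : PySem.List.len ws = ((ws.length : Nat) : Int) := by simp [PySem.List.len_eq]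
  rw [hn]
  simp only [List.foldl_cons, List.foldl_nil, PySem.List.pyGetD_natCast]
  rw [List.getD_append_right _ _ _ _ (by omega), List.getD_append_right _ _ _ _ (by omega),
      List.getD_append_right _ _ _ _ (by omega)]
  simp only [h1, h2, Nat.sub_self]
  cases e <;> simp [List.getD]

-- with an empty current word, B's loop does not depend on word_start
theorem loopB_wstart (cs : List Char) : ∀ (i : Int) (flag : Bool) (s t : Int)
    (acc : List (Int × String × String)),
    loopB cs i flag [] s acc = loopB cs i flag [] t acc := by
  induction cs with
  | nil => intro i flag s t acc; rfl
  | cons c rest ih =>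
    intro i flag s t acc
    by_cases hc : c ∈ sepWords
    · simp [loopB, hc]
      exact ih _ _ _ _ _
    · simp [loopB, hc]

-- B's loop over a run of non-separator characters accumulates exactly A's readWordA word
theorem loopB_word (rest : List Char) : ∀ (pos : Int) (flag : Bool) (v : List Char) (vstart : Int)
    (acc : List (Int × String × String)), v ≠ [] →
    loopB rest pos flag v vstart acc =
      loopB (readWordA rest pos).1 (readWordA rest pos).2.1 flag
        (v ++ (readWordA rest pos).2.2) vstart acc := by
  induction rest with
  | nil => intro pos flag v vstart acc hv; simp [readWordA]
  | cons d ds ih =>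
    intro pos flag v vstart acc hv
    by_cases hd : d ∈ sepWords
    · simp [readWordA, hd]
    · simp [loopB, readWordA, hd, hv]
      rw [ih (pos + 1) flag (v ++ [d]) vstart acc (by simp)]
      simp

-- flushing the pending word: when the next character is a separator (or the text ends),
-- B's state (flag, word, wstart, acc) collapses to (true, [], –, flushed acc)
theorem loopB_flush (rem : List Char) (pos : Int) (flag : Bool) (w : List Char) (ws ws' : Int)
    (acc : List (Int × String × String))
    (hw : w ≠ [])
    (hrem : rem = [] ∨ ∃ d t, rem = d :: t ∧ d ∈ sepWords) :
    loopB rem pos flag w ws acc =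
      loopB rem pos true [] ws'
        (if entityB flag w then acc ++ [(ws, String.mk w, "")] else acc) := by
  rcases hrem with rfl | ⟨d, t, rfl, hd⟩
  · simp [loopB, hw]
  · simp [loopB, hd, hw]
    split_ifs <;> exact loopB_wstart _ _ _ _ _ _

theorem readWordA_stop (cs : List Char) : ∀ (pos : Int),
    (readWordA cs pos).1 = [] ∨
      ∃ d t, (readWordA cs pos).1 = d :: t ∧ d ∈ sepWords := by
  induction cs with
  | nil => intro pos; left; simp [readWordA]
  | cons c rest ih =>
    intro pos
    by_cases hc : c ∈ sepWords
    · right; exact ⟨c, rest, by simp [readWordA, hc], hc⟩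
    · simpa [readWordA, hc] using ih (pos + 1)

-- the fuel of loopA is irrelevant once it is at least the number of remaining characters
theorem loopA_fuel (f : Nat) : ∀ (g : Nat) (cs : List Char), cs.length ≤ f → cs.length ≤ g →
    ∀ (pos : Int) (ss : List (List Int)) (cur : Int)
      (words : List String) (wpos : List Int) (ents : List (Option String)),
      loopA f cs pos ss cur words wpos ents = loopA g cs pos ss cur words wpos ents := by
  induction f with
  | zero =>
    intro g cs hf hg pos ss cur words wpos ents
    have hcs : cs = [] := by cases cs <;> simp_all
    subst hcs
    cases g <;> simp [loopA, skipSepsA]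
  | succ f ih =>
    intro g cs hf hg pos ss cur words wpos ents
    cases cs with
    | nil => cases g <;> simp [loopA, skipSepsA]
    | cons c rest =>
      cases g with
      | zero => simp at hg
      | succ g =>
        simp only [loopA]
        rcases hsk : skipSepsA (c :: rest) pos ss cur with ⟨rem, pos1, ss1, cur1⟩
        have hrem : rem.length ≤ rest.length + 1 := by
          have := skipSepsA_fst_len (c :: rest) pos ss cur
          rw [hsk] at this; simpa using this
        cases rem with
        | nil => rfl
        | cons c2 rest2 =>
          dsimp only
          apply ih
          · have := readWordA_fst_len rest2 (pos1 + 1)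
            simp at hrem hf
            omega
          · have := readWordA_fst_len rest2 (pos1 + 1)
            simp at hrem hg
            omega

-- B's handling of one separator character at top-of-iteration state
theorem loopB_sep_step (c : Char) (rest : List Char) (pos : Int) (flag : Bool) (wstart : Int)
    (acc : List (Int × String × String)) (hc : c ∈ sepWords) :
    loopB (c :: rest) pos flag [] wstart acc =
      loopB rest (pos + 1) (if c ∈ sepSentences ∧ flag = true then false else flag) [] wstart acc := by
  simp [loopB, hc]

-- the main simulation: B's loop at top-of-iteration state computes A's final filter pass
theorem main_sim (f : Nat) : ∀ (cs : List Char), cs.length ≤ f →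
    ∀ (pos : Int) (ss : List (List Int)) (last : List Int)
      (words : List String) (wpos : List Int) (ents : List (Option String))
      (wstart : Int),
      wpos.length = words.length → ents.length = words.length →
      loopB cs pos (!last.isEmpty) [] wstart (passA words wpos ents) =
        (fun r => passA r.1 r.2.1 r.2.2)
          (loopA f cs pos (ss ++ [last]) (ss.length : Int) words wpos ents) := by
  induction f with
  | zero =>
    intro cs hf pos ss last words wpos ents wstart hp he
    have hcs : cs = [] := by cases cs <;> simp_all
    subst hcs
    rfl
  | succ f ih =>
    intro cs hf pos ss last words wpos ents wstart hp he
    cases cs with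
    | nil => rfl
    | cons c rest =>
      have hrest : rest.length ≤ f := by simp at hf; omega
      by_cases hc : c ∈ sepWords
      · -- separator character: one step of A's skip loop
        have hget := getD_append_length ss last
        rw [loopB_sep_step c rest pos _ wstart _ hc]
        by_cases hsep : c ∈ sepSentences
        · by_cases hl : last = []
          · -- empty current sentence: no new sentence is opened
            have hskip : skipSepsA (c :: rest) pos (ss ++ [last]) (ss.length : Int) =
                skipSepsA rest (pos + 1) (ss ++ [last]) (ss.length : Int) := by
              simp [skipSepsA, hc, hsep, hl]
            have hA : loopA (f + 1) (c :: rest) pos (ss ++ [last]) (ss.length : Int) words wpos ents =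
                loopA (f + 1) rest (pos + 1) (ss ++ [last]) (ss.length : Int) words wpos ents := by
              simp only [loopA]; rw [hskip]
            rw [hA, loopA_fuel (f + 1) f rest (by omega) hrest]
            have hflag : (if c ∈ sepSentences ∧ (!last.isEmpty) = true then false else (!last.isEmpty)) =
                (!last.isEmpty) := by simp [hl]
            rw [hflag]
            exact ih rest hrest (pos + 1) ss last words wpos ents wstart hp he
          · -- non-empty current sentence: a new empty sentence is opened
            have hskip : skipSepsA (c :: rest) pos (ss ++ [last]) (ss.length : Int) =
                skipSepsA rest (pos + 1) ((ss ++ [last]) ++ [[]]) ((ss.length : Int) + 1) := by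
              have hlen : 0 < last.length := by cases last <;> simp_all
              simp [skipSepsA, hc, hsep, hget, hlen]
            have hcast : ((ss.length : Int) + 1) = (((ss ++ [last]).length : Int)) := by simp
            have hA : loopA (f + 1) (c :: rest) pos (ss ++ [last]) (ss.length : Int) words wpos ents =
                loopA (f + 1) rest (pos + 1) ((ss ++ [last]) ++ [[]]) (((ss ++ [last]).length : Int)) words wpos ents := by
              simp only [loopA]; rw [hskip, hcast]
            rw [hA, loopA_fuel (f + 1) f rest (by omega) hrest]
            have hflag : (if c ∈ sepSentences ∧ (!last.isEmpty) = true then false else (!last.isEmpty)) =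
                (!([] : List Int).isEmpty) := by simp [hsep, hl]
            rw [hflag]
            exact ih rest hrest (pos + 1) (ss ++ [last]) [] words wpos ents wstart hp he
        · -- not a sentence separator: state unchanged
          have hskip : skipSepsA (c :: rest) pos (ss ++ [last]) (ss.length : Int) =
              skipSepsA rest (pos + 1) (ss ++ [last]) (ss.length : Int) := by
            simp [skipSepsA, hc, hsep]
          have hA : loopA (f + 1) (c :: rest) pos (ss ++ [last]) (ss.length : Int) words wpos ents =
              loopA (f + 1) rest (pos + 1) (ss ++ [last]) (ss.length : Int) words wpos ents := by
            simp only [loopA]; rw [hskip]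
          rw [hA, loopA_fuel (f + 1) f rest (by omega) hrest]
          have hflag : (if c ∈ sepSentences ∧ (!last.isEmpty) = true then false else (!last.isEmpty)) =
              (!last.isEmpty) := by simp [hsep]
          rw [hflag]
          exact ih rest hrest (pos + 1) ss last words wpos ents wstart hp he
      · -- word character: A reads the word c :: w', B accumulates it character by character
        have hskip : skipSepsA (c :: rest) pos (ss ++ [last]) (ss.length : Int) =
            (c :: rest, pos, ss ++ [last], (ss.length : Int)) := by
          simp [skipSepsA, hc]
        have hA : loopA (f + 1) (c :: rest) pos (ss ++ [last]) (ss.length : Int) words wpos ents =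
            loopA f (readWordA rest (pos + 1)).1 (readWordA rest (pos + 1)).2.1
              (PySem.List.pySetD (ss ++ [last]) (ss.length : Int)
                ((PySem.List.pyGetD (ss ++ [last]) (ss.length : Int) []) ++ [PySem.List.len words]))
              (ss.length : Int)
              (words ++ [String.mk (c :: (readWordA rest (pos + 1)).2.2)])
              (wpos ++ [pos])
              (ents ++ [entityA (ss ++ [last]) (ss.length : Int) (c :: (readWordA rest (pos + 1)).2.2)]) := by
          simp only [loopA]; rw [hskip]
        rw [hA]
        rw [getD_append_length, setD_append_length]
        -- B side: consume the word, then flush it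
        have hBword : loopB (c :: rest) pos (!last.isEmpty) [] wstart (passA words wpos ents) =
            loopB rest (pos + 1) (!last.isEmpty) [c] pos (passA words wpos ents) := by
          simp [loopB, hc]
        rw [hBword,
          loopB_word rest (pos + 1) (!last.isEmpty) [c] pos (passA words wpos ents) (by simp),
          List.singleton_append,
          loopB_flush (readWordA rest (pos + 1)).1 (readWordA rest (pos + 1)).2.1 (!last.isEmpty)
            (c :: (readWordA rest (pos + 1)).2.2) pos wstart (passA words wpos ents) (by simp)
            (readWordA_stop rest (pos + 1))]
        have hacc : (if entityB (!last.isEmpty) (c :: (readWordA rest (pos + 1)).2.2) then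
                passA words wpos ents ++ [(pos, String.mk (c :: (readWordA rest (pos + 1)).2.2), "")]
              else passA words wpos ents) =
            passA (words ++ [String.mk (c :: (readWordA rest (pos + 1)).2.2)]) (wpos ++ [pos])
              (ents ++ [entityA (ss ++ [last]) (ss.length : Int) (c :: (readWordA rest (pos + 1)).2.2)]) := by
          rw [passA_append _ _ _ _ _ _ hp he, entityA_eq_entityB]
          cases hE : entityB (!last.isEmpty) (c :: (readWordA rest (pos + 1)).2.2) <;> simp
        rw [hacc]
        have hflush : (true : Bool) = (!(last ++ [PySem.List.len words]).isEmpty) := by simp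
        rw [hflush]
        have hb1 : (readWordA rest (pos + 1)).1.length ≤ f := by
          have := readWordA_fst_len rest (pos + 1); omega
        have := ih (readWordA rest (pos + 1)).1 hb1 (readWordA rest (pos + 1)).2.1
          ss (last ++ [PySem.List.len words])
          (words ++ [String.mk (c :: (readWordA rest (pos + 1)).2.2)]) (wpos ++ [pos])
          (ents ++ [entityA (ss ++ [last]) (ss.length : Int) (c :: (readWordA rest (pos + 1)).2.2)])
          wstart (by simp [hp]) (by simp [he])
        simpa using this

theorem recognize_spec : Claim_equal_recognize := by
  intro txt _
  unfold Spec_recognize recognize recognize_alt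
  have h := main_sim txt.toList.length txt.toList (le_refl _) 0 [] [] [] [] [] 0 rfl rfl
  simpa using h.symm
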